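-- pv_equiv track=rewrite | github.com/vragulin/AdventOfCode_2023 | day13/aoc_202313.py | parse
-- ===== SOURCE A (Python) =====
-- def parse(puzzle_input):
-- 	"""  Read puzzle input
-- 	:param puzzle_input:
-- 	:return:
-- 	"""
-- 	lines = puzzle_input.split('\n')
-- 	data = []
-- 	current_block = []
-- 	for line in lines:
-- 		if len(line) == 0:
-- 			if len(current_block) > 0:
-- 				data.append(current_block)
-- 				current_block = []
-- 		else:
-- 			current_block.append(list(line.strip()))
--
-- 	if len(current_block) > 0:
-- 		data.append(current_block)
--
-- 	return data
-- ===== SOURCE B (Python) =====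
-- def parse(puzzle_input):
--     """Read puzzle input: two-pointer run extraction over the split lines
--     instead of a flush state machine."""
--     lines = puzzle_input.split('\n')
--     data = []
--     i, n = 0, len(lines)
--     while i < n:
--         if not lines[i]:
--             i += 1
--             continue
--         j = i
--         while j < n and lines[j]:
--             j += 1
--         data.append([list(line.strip()) for line in lines[i:j]])
--         i = j
--     return data
-- ===== Notes on version B (the rewrite author's own statement) =====
-- stated objective: alternative
-- what changed: Replaces A's flush-on-blank state machine (mutable current_block appended and reset inside the loop, plus a final flush) with a two-pointer scan that skips blank lines and extracts each maximal run of non-empty lines as one block via a comprehension, so no partial-block state or trailing flush exists.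
import Mathlib
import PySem

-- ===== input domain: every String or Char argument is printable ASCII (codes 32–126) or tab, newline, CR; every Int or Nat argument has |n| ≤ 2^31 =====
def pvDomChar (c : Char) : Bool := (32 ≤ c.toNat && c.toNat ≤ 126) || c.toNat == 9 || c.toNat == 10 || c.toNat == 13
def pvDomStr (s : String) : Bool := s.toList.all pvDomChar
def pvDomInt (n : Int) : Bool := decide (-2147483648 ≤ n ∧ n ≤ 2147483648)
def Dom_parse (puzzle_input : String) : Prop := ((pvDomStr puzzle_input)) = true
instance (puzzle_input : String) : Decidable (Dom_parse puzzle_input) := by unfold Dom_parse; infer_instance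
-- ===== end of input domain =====

-- B replaces A's flush-on-blank state machine by a two-pointer run extraction (alternative decomposition, same cost).

-- list(line.strip()) : the stripped line as a list of one-character strings (used by both sources)
def pvProcLine (line : String) : List String :=
  (PySem.Str.strip line).toList.map (fun c => String.ofList [c])

-- ===== PORT A =====
-- the body of A's for-loop, as a fold step over the state (data, current_block)
def pvStepA (st : List (List (List String)) × List (List String)) (line : String) :
    List (List (List String)) × List (List String) :=
  if PySem.Str.len line = 0 then
    if st.2.length > 0 then (st.1 ++ [st.2], []) else st
  else (st.1, st.2 ++ [pvProcLine line])

-- the final flush after the loop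
def pvFinalA (st : List (List (List String)) × List (List String)) :
    List (List (List String)) :=
  if st.2.length > 0 then st.1 ++ [st.2] else st.1

def parse (puzzle_input : String) : List (List (List String)) :=
  let lines := (PySem.Str.split? puzzle_input "\n").getD []
  pvFinalA (lines.foldl pvStepA ([], []))

-- ===== PORT B =====
-- B's inner-while predicate: the line is non-blank
def pvNB (x : String) : Bool := PySem.Str.len x != 0

-- B's outer while loop: skip blank lines; extract the maximal run of non-blank lines as one block
def pvGoB : List String → List (List (List String))
  | [] => []
  | l :: ls =>
    if pvNB l then ((l :: ls.takeWhile pvNB).map pvProcLine) :: pvGoB (ls.dropWhile pvNB)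
    else pvGoB ls
termination_by ls => ls.length
decreasing_by
  · simp only [List.length_cons]
    exact Nat.lt_succ_of_le (List.length_dropWhile_le pvNB ls)
  · simp

def parse_alt (puzzle_input : String) : List (List (List String)) :=
  pvGoB ((PySem.Str.split? puzzle_input "\n").getD [])

-- ===== PRECONDITION & SPEC =====
def Spec_parse (puzzle_input : String) (out : List (List (List String))) : Prop := out = parse_alt puzzle_input
instance (puzzle_input : String) (out : List (List (List String))) : Decidable (Spec_parse puzzle_input out) := by unfold Spec_parse; infer_instance

-- ===== CLAIM (what is proved, stated in full; the proofs are below) =====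
def Claim_equal_parse : Prop := ∀ (puzzle_input : String), Dom_parse puzzle_input → Spec_parse puzzle_input (parse puzzle_input)

-- ===== LEMMAS AND PROOFS =====

lemma pvGoB_cons_pos (l : String) (ls : List String) (h : pvNB l = true) :
    pvGoB (l :: ls) = ((l :: ls.takeWhile pvNB).map pvProcLine) :: pvGoB (ls.dropWhile pvNB) := by
  rw [pvGoB]; rw [if_pos h]

lemma pvGoB_cons_neg (l : String) (ls : List String) (h : pvNB l = false) :
    pvGoB (l :: ls) = pvGoB ls := by
  rw [pvGoB]; rw [if_neg (by simp [h])]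

lemma pv_key (ls : List String) :
    ∀ (d : List (List (List String))) (c : List (List String)),
      pvFinalA (ls.foldl pvStepA (d, c)) =
        d ++ (if c = [] then pvGoB ls
              else (c ++ (ls.takeWhile pvNB).map pvProcLine) :: pvGoB (ls.dropWhile pvNB)) := by
  induction ls with
  | nil =>
    intro d c
    cases c with
    | nil => simp [pvFinalA, pvGoB]
    | cons h t => simp [pvFinalA, pvGoB]
  | cons l ls ih =>
    intro d c
    by_cases hl : l = ""
    · have hp : pvNB l = false := by simp [pvNB, hl]
      cases c with
      | nil =>
        have hstep : pvStepA (d, ([] : List (List String))) l = (d, []) := by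
          simp [pvStepA, hl]
        rw [List.foldl_cons, hstep, ih d [], pvGoB_cons_neg l ls hp]
        simp
      | cons h t =>
        have hstep : pvStepA (d, h :: t) l = (d ++ [h :: t], []) := by
          simp [pvStepA, hl]
        rw [List.foldl_cons, hstep, ih (d ++ [h :: t]) [], pvGoB_cons_neg l ls hp,
            List.dropWhile_cons_of_neg (show ¬pvNB l = true by simp [hp]),
            pvGoB_cons_neg l ls hp]
        simp [hp]
    · have hp : pvNB l = true := by simp [pvNB, hl]
      have hstep : pvStepA (d, c) l = (d, c ++ [pvProcLine l]) := by
        simp [pvStepA, hl]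
      rw [List.foldl_cons, hstep, ih d (c ++ [pvProcLine l]),
          List.takeWhile_cons_of_pos (p := pvNB) hp, List.dropWhile_cons_of_pos (p := pvNB) hp]
      cases c with
      | nil => rw [pvGoB_cons_pos l ls hp]; simp
      | cons h t => simp

-- ===== VERDICT (by name: the statement is the Claim_ definition above) =====
theorem parse_spec : Claim_equal_parse := by
  intro puzzle_input _
  unfold Spec_parse parse parse_alt
  simpa using pv_key ((PySem.Str.split? puzzle_input "\n").getD []) [] []
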